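-- pv_equiv track=rewrite | github.com/CamiloJose/Intro.Progra | Semestre 1/Dado un numero forme un nuevo numero solo con los digitos pares de dicho numero(While).py | forme_par_aux
-- ===== SOURCE A (Python) =====
-- def forme_par_aux(num):
--     result=0
--     exp=0
--     while num >0:
--         digi = num%10
--         if digi%2 ==0:
--             result += (digi*10**exp)
--             exp +=1
--         num//=10
--     return result
-- ===== SOURCE B (Python) =====
-- def forme_par_aux(num):
--     # Materialize the decimal digits (MSB-first), filter the even ones,
--     # then fold them back into a number; no exponent accumulator.
--     digits = []
--     n = num
--     while n > 0:
--         digits.append(n % 10)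
--         n //= 10
--     digits.reverse()
--     result = 0
--     for d in [d for d in digits if d % 2 == 0]:
--         result = result * 10 + d
--     return result
-- ===== Notes on version B (the rewrite author's own statement) =====
-- stated objective: alternative
-- what changed: B materializes an explicit MSB-first digit list, filters the even digits, and folds them most-significant-first into the result, instead of A's fused LSB-to-MSB loop that places each even digit with a growing power-of-ten exponent accumulator.
import Mathlib
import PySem

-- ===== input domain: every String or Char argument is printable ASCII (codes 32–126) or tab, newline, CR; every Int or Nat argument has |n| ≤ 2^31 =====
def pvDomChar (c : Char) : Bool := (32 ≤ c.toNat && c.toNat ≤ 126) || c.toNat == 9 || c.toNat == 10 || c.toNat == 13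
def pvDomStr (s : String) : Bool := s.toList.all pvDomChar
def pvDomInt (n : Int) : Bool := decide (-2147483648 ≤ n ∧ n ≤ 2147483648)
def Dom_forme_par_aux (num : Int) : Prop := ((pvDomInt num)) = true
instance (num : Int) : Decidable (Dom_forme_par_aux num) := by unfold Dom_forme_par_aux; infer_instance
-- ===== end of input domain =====

-- B replaces A's fused LSB→MSB loop with exponent accumulator by: build digit list, filter evens, fold MSB-first (alternative decomposition, same cost).


-- termination helper (cited by both ports' decreasing_by)
theorem pvFdivTenLt (n : Int) (h : 0 < n) : (PySem.Int.floordiv n 10).toNat < n.toNat := by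
  have h1 : PySem.Int.floordiv n 10 < n :=
    (PySem.Int.floordiv_lt_iff_lt_mul (by norm_num)).mpr (by nlinarith)
  have h2 : 0 ≤ PySem.Int.floordiv n 10 := by
    rw [PySem.Int.floordiv_eq_ediv_of_pos (by norm_num)]
    exact Int.ediv_nonneg h.le (by norm_num)
  omega

-- ===== PORT A =====
-- the while loop of A; exp stays ≥ 0 throughout, so 10**exp is 10 ^ exp.toNat (exact)
def formeLoopA (num result exp : Int) : Int :=
  if h : 0 < num then
    let digi := PySem.Int.mod num 10
    if PySem.Int.mod digi 2 = 0 then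
      formeLoopA (PySem.Int.floordiv num 10) (result + digi * 10 ^ exp.toNat) (exp + 1)
    else
      formeLoopA (PySem.Int.floordiv num 10) result exp
  else result
termination_by num.toNat
decreasing_by all_goals exact pvFdivTenLt num h

def forme_par_aux (num : Int) : Int := formeLoopA num 0 0

-- ===== PORT B =====
-- Source B's first while loop: collect digits LSB-first (reversed afterwards, as Source B does)
def digitsRevB (n : Int) : List Int :=
  if h : 0 < n then PySem.Int.mod n 10 :: digitsRevB (PySem.Int.floordiv n 10) else []
termination_by n.toNat
decreasing_by exact pvFdivTenLt n h

def forme_par_aux_alt (num : Int) : Int :=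
  let digits := (digitsRevB num).reverse
  let evens := digits.filter (fun d => PySem.Int.mod d 2 == 0)
  evens.foldl (fun r d => r * 10 + d) 0

-- ===== PRECONDITION & SPEC =====
def Spec_forme_par_aux (num : Int) (out : Int) : Prop := out = forme_par_aux_alt num
instance (num : Int) (out : Int) : Decidable (Spec_forme_par_aux num out) := by unfold Spec_forme_par_aux; infer_instance

-- ===== CLAIM (what is proved, stated in full; the proofs are below) =====
def Claim_equal_forme_par_aux : Prop := ∀ (num : Int), Dom_forme_par_aux num → Spec_forme_par_aux num (forme_par_aux num)

-- ===== LEMMAS AND PROOFS =====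

-- value B extracts from the (LSB-first) digit list
def pvVal (L : List Int) : Int :=
  (L.reverse.filter (fun d => PySem.Int.mod d 2 == 0)).foldl (fun r d => r * 10 + d) 0

theorem pvVal_cons (d : Int) (L : List Int) :
    pvVal (d :: L)
      = if PySem.Int.mod d 2 = 0 then pvVal L * 10 + d else pvVal L := by
  unfold pvVal
  simp only [List.reverse_cons, List.filter_append, List.foldl_append]
  by_cases h : PySem.Int.mod d 2 = 0
  · rw [if_pos h]
    have hb : (PySem.Int.mod d 2 == 0) = true := beq_iff_eq.mpr h
    simp only [List.filter_cons, List.filter_nil, hb, if_true, List.foldl_cons, List.foldl_nil]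
  · rw [if_neg h]
    have hb : (PySem.Int.mod d 2 == 0) = false := beq_eq_false_iff_ne.mpr h
    simp only [List.filter_cons, List.filter_nil, hb, Bool.false_eq_true, if_false,
      List.foldl_nil]

theorem pvLoopA_eq (n : Int) : ∀ r e : Int, 0 ≤ e →
    formeLoopA n r e = r + pvVal (digitsRevB n) * 10 ^ e.toNat := by
  induction hn : n.toNat using Nat.strong_induction_on generalizing n with
  | _ k ih =>
    intro r e he
    rw [formeLoopA, digitsRevB]
    by_cases h : 0 < n
    · simp only [h, dite_true]
      have hrec := ih (PySem.Int.floordiv n 10).toNat (hn ▸ pvFdivTenLt n h) _ rfl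
      rw [pvVal_cons]
      by_cases hd : PySem.Int.mod (PySem.Int.mod n 10) 2 = 0
      · simp only [hd, if_true]
        rw [hrec _ (e + 1) (by omega)]
        have : (e + 1).toNat = e.toNat + 1 := by omega
        rw [this, pow_succ]
        ring
      · simp only [hd, if_false]
        rw [hrec _ e he]
    · simp only [h, dite_false]
      simp [pvVal]

theorem forme_par_aux_alt_eq (num : Int) : forme_par_aux_alt num = pvVal (digitsRevB num) := rfl

-- ===== VERDICT (by name: the statement is the Claim_ definition above) =====
theorem forme_par_aux_spec : Claim_equal_forme_par_aux := by
  intro num _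
  unfold Spec_forme_par_aux forme_par_aux
  rw [pvLoopA_eq num 0 0 le_rfl, forme_par_aux_alt_eq]
  simp
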